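-- pv_equiv track=rewrite | github.com/ipallin/Flashback-dbg | flashback/core/cfg_builder.py | _assign_blocks_to_functions
-- ===== SOURCE A (Python) =====
-- def _assign_blocks_to_functions(raw_blocks: dict[int, list[int]],
--                                   func_starts: set[int]) -> dict[int, int]:
--     """
--     Asigna cada bloque a la función cuya entrada está más próxima por abajo.
--     Heurística válida para código compilado sin CFG obfuscation.
--     """
--     sorted_funcs = sorted(func_starts)
--     assignment: dict[int, int] = {}
--
--     for block_addr in raw_blocks:
--         # Función más cercana por abajo
--         func = None
--         for fs in sorted_funcs:
--             if fs <= block_addr: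
--                 func = fs
--             else:
--                 break
--         if func is not None:
--             assignment[block_addr] = func
--
--     return assignment
-- ===== SOURCE B (Python) =====
-- def _assign_blocks_to_functions(raw_blocks, func_starts):
--     """Same assignment, but each block finds its function by binary search
--     (rightmost func start <= block) instead of a linear scan."""
--     funcs = sorted(func_starts)
--     assignment = {}
--     for block_addr in raw_blocks:
--         lo, hi = 0, len(funcs)
--         while lo < hi:
--             mid = (lo + hi) // 2
--             if funcs[mid] <= block_addr:
--                 lo = mid + 1
--             else:
--                 hi = mid
--         if lo:
--             assignment[block_addr] = funcs[lo - 1]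
--     return assignment
-- ===== Notes on version B (the rewrite author's own statement) =====
-- stated objective: faster
-- what changed: Replaces the per-block linear scan of the sorted function starts with a hand-written binary search (bisect_right) that finds the rightmost start <= block address.
import Mathlib
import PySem

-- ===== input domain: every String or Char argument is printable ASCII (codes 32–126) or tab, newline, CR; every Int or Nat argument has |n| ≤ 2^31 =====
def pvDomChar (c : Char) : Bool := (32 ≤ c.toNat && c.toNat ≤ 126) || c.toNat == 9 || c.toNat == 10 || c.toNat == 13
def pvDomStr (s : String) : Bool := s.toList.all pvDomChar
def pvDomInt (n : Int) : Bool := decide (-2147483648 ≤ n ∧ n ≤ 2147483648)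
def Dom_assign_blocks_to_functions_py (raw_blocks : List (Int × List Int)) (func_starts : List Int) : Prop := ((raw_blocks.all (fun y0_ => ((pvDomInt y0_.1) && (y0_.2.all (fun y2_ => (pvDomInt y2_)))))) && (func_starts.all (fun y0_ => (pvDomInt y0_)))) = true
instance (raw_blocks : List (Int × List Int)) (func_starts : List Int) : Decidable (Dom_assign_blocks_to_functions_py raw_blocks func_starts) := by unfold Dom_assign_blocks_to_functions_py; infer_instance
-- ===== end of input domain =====

-- B replaces A's per-block linear scan of the sorted function starts with a binary search
-- (rightmost start ≤ block address); objective: faster (asymptotic: O(B·F) inner scans → O(B·log F)).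

-- ===== PORT A =====
-- Inner 'for fs in sorted_funcs: if fs <= block_addr: func = fs else: break'
def pvInnerScan (block_addr : Int) : List Int → Option Int → Option Int
  | [], func => func
  | fs :: rest, func =>
      if fs ≤ block_addr then pvInnerScan block_addr rest (some fs) else func

def assign_blocks_to_functions_py (raw_blocks : List (Int × List Int)) (func_starts : List Int) : List (Int × Int) :=
  let sorted_funcs := PySem.List.sorted func_starts (fun x => x)
  (raw_blocks.foldl (fun (assignment : PySem.Dict Int Int) p =>
      match pvInnerScan p.1 sorted_funcs none with
      | some f => assignment.insert p.1 f
      | none => assignment) PySem.Dict.empty).items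

-- ===== PORT B =====
-- the hand-written 'while lo < hi' binary-search loop of Source B (funcs[mid] is always in range there)
def pvBSearch (funcs : List Int) (block_addr : Int) (lo hi : Nat) : Nat :=
  if _h : lo < hi then
    let mid := (lo + hi) / 2
    if funcs.getD mid 0 ≤ block_addr then pvBSearch funcs block_addr (mid + 1) hi
    else pvBSearch funcs block_addr lo mid
  else lo
termination_by hi - lo
decreasing_by all_goals omega

def assign_blocks_to_functions_py_alt (raw_blocks : List (Int × List Int)) (func_starts : List Int) : List (Int × Int) :=
  let funcs := PySem.List.sorted func_starts (fun x => x)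
  (raw_blocks.foldl (fun (assignment : PySem.Dict Int Int) p =>
      let lo := pvBSearch funcs p.1 0 funcs.length
      if lo ≠ 0 then assignment.insert p.1 (funcs.getD (lo - 1) 0) else assignment)
    PySem.Dict.empty).items

-- ===== PRECONDITION & SPEC =====
def Spec_assign_blocks_to_functions_py (raw_blocks : List (Int × List Int)) (func_starts : List Int) (out : List (Int × Int)) : Prop := out = assign_blocks_to_functions_py_alt raw_blocks func_starts
instance (raw_blocks : List (Int × List Int)) (func_starts : List Int) (out : List (Int × Int)) : Decidable (Spec_assign_blocks_to_functions_py raw_blocks func_starts out) := by unfold Spec_assign_blocks_to_functions_py; infer_instance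

-- ===== CLAIM (what is proved, stated in full; the proofs are below) =====
def Claim_equal_assign_blocks_to_functions_py : Prop := ∀ (raw_blocks : List (Int × List Int)) (func_starts : List Int), Dom_assign_blocks_to_functions_py raw_blocks func_starts → Spec_assign_blocks_to_functions_py raw_blocks func_starts (assign_blocks_to_functions_py raw_blocks func_starts)

-- ===== LEMMAS AND PROOFS =====

-- length of the '≤ b' prefix of a list: the value both the scan and the binary search compute
def pvCnt (b : Int) : List Int → Nat
  | [] => 0
  | x :: xs => if x ≤ b then pvCnt b xs + 1 else 0

theorem pvCnt_le_length (b : Int) (l : List Int) : pvCnt b l ≤ l.length := by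
  induction l with
  | nil => simp [pvCnt]
  | cons x xs ih => simp only [pvCnt, List.length_cons]; split <;> omega

theorem pvCnt_getD_le (b : Int) (l : List Int) (i : Nat) (hi : i < pvCnt b l) :
    l.getD i 0 ≤ b := by
  induction l generalizing i with
  | nil => simp [pvCnt] at hi
  | cons x xs ih =>
    simp only [pvCnt] at hi
    split at hi
    · cases i with
      | zero => simpa [List.getD]
      | succ j => simpa [List.getD] using ih j (by omega)
    · omega

theorem pvCnt_getD_gt (b : Int) (l : List Int) (hs : l.Pairwise (· ≤ ·)) (i : Nat)
    (hc : pvCnt b l ≤ i) (hl : i < l.length) : b < l.getD i 0 := by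
  induction l generalizing i with
  | nil => simp at hl
  | cons x xs ih =>
    rw [List.pairwise_cons] at hs
    simp only [pvCnt] at hc
    split at hc
    · cases i with
      | zero => omega
      | succ j =>
        simpa [List.getD] using ih hs.2 j (by omega) (by simpa using hl)
    · rename_i hx
      cases i with
      | zero => simpa [List.getD] using (by omega : b < x)
      | succ j =>
        have hj : j < xs.length := by simpa using hl
        have : xs.getD j 0 = xs[j] := List.getD_eq_getElem xs 0 hj
        have hmem : xs[j] ∈ xs := List.getElem_mem hj
        have := hs.1 _ hmem
        simp only [List.getD_cons_succ]
        omega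

theorem pvInnerScan_eq (b : Int) (l : List Int) (acc : Option Int) :
    pvInnerScan b l acc =
      if pvCnt b l = 0 then acc else some (l.getD (pvCnt b l - 1) 0) := by
  induction l generalizing acc with
  | nil => simp [pvInnerScan, pvCnt]
  | cons x xs ih =>
    simp only [pvInnerScan, pvCnt]
    split
    · rw [ih]
      cases h : pvCnt b xs with
      | zero => simp [List.getD]
      | succ n => simp [List.getD]
    · simp

theorem pvBSearch_eq (l : List Int) (b : Int) (hs : l.Pairwise (· ≤ ·)) :
    ∀ fuel lo hi, hi - lo ≤ fuel → hi ≤ l.length → lo ≤ pvCnt b l → pvCnt b l ≤ hi →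
      pvBSearch l b lo hi = pvCnt b l := by
  intro fuel
  induction fuel with
  | zero =>
    intro lo hi h1 _ h3 h4
    rw [pvBSearch]
    have : ¬ lo < hi := by omega
    simp only [this, dite_false]
    omega
  | succ n ih =>
    intro lo hi h1 h2 h3 h4
    rw [pvBSearch]
    by_cases hlt : lo < hi
    · simp only [hlt, dite_true]
      have hmid1 : lo ≤ (lo + hi) / 2 := by omega
      have hmid2 : (lo + hi) / 2 < hi := by omega
      by_cases hle : l.getD ((lo + hi) / 2) 0 ≤ b
      · simp only [hle, if_true]
        have hcnt : (lo + hi) / 2 + 1 ≤ pvCnt b l := by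
          by_contra hcon
          exact absurd hle (not_le.mpr (pvCnt_getD_gt b l hs _ (by omega) (by omega)))
        exact ih _ _ (by omega) h2 hcnt h4
      · simp only [hle, if_false]
        have hcnt : pvCnt b l ≤ (lo + hi) / 2 := by
          by_contra hcon
          exact hle (pvCnt_getD_le b l _ (by omega))
        exact ih _ _ (by omega) (by omega) h3 hcnt
    · simp only [hlt, dite_false]
      omega

-- the two per-block step functions agree
theorem pv_step_eq (func_starts : List Int) (p : Int × List Int)
    (assignment : PySem.Dict Int Int) :
    (match pvInnerScan p.1 (PySem.List.sorted func_starts (fun x => x)) none with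
      | some f => assignment.insert p.1 f
      | none => assignment) =
    (let funcs := PySem.List.sorted func_starts (fun x => x)
     let lo := pvBSearch funcs p.1 0 funcs.length
     if lo ≠ 0 then assignment.insert p.1 (funcs.getD (lo - 1) 0) else assignment) := by
  have hs : (PySem.List.sorted func_starts (fun x => x)).Pairwise (· ≤ ·) :=
    PySem.List.sorted_pairwise func_starts (fun x => x)
  set funcs := PySem.List.sorted func_starts (fun x => x) with hf
  have hb : pvBSearch funcs p.1 0 funcs.length = pvCnt p.1 funcs :=
    pvBSearch_eq funcs p.1 hs funcs.length 0 funcs.length (by omega) le_rfl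
      (Nat.zero_le _) (pvCnt_le_length _ _)
  rw [pvInnerScan_eq]
  simp only [hb]
  by_cases h0 : pvCnt p.1 funcs = 0
  · simp [h0]
  · simp [h0]

-- ===== VERDICT (by name: the statement is the Claim_ definition above) =====
theorem assign_blocks_to_functions_py_spec : Claim_equal_assign_blocks_to_functions_py := by
  intro raw_blocks func_starts _
  unfold Spec_assign_blocks_to_functions_py
  unfold assign_blocks_to_functions_py assign_blocks_to_functions_py_alt
  have hstep : (fun (assignment : PySem.Dict Int Int) (p : Int × List Int) =>
      match pvInnerScan p.1 (PySem.List.sorted func_starts (fun x => x)) none with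
      | some f => assignment.insert p.1 f
      | none => assignment) =
    (fun (assignment : PySem.Dict Int Int) (p : Int × List Int) =>
      let lo := pvBSearch (PySem.List.sorted func_starts (fun x => x)) p.1 0
        (PySem.List.sorted func_starts (fun x => x)).length
      if lo ≠ 0 then
        assignment.insert p.1 ((PySem.List.sorted func_starts (fun x => x)).getD (lo - 1) 0)
      else assignment) := by
    funext assignment p
    exact pv_step_eq func_starts p assignment
  simp only [hstep]
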